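-- pv_equiv track=rewrite | github.com/ysydhc/team_memory | src/team_memory/services/archive.py | derive_overview_fallback
-- ===== SOURCE A (Python) =====
-- OVERVIEW_FALLBACK_MAX = 2000
--
-- def derive_overview_fallback(solution_doc: str, max_len: int = OVERVIEW_FALLBACK_MAX) -> str:
--     """Deterministic L1 when caller omits overview: prefer first ## section else head."""
--     t = (solution_doc or "").strip()
--     if not t:
--         return ""
--     lines = t.split("\n")
--     start_idx = 0
--     for i, line in enumerate(lines):
--         if line.startswith("## ") and i > 0:
--             start_idx = i
--             break
--     chunk = "\n".join(lines[start_idx:]).strip() if start_idx else t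
--     chunk = chunk[:max_len].rstrip()
--     return chunk or t[:max_len]
-- ===== SOURCE B (Python) =====
-- OVERVIEW_FALLBACK_MAX = 2000
--
-- def derive_overview_fallback(solution_doc: str, max_len: int = OVERVIEW_FALLBACK_MAX) -> str:
--     """Same result as A, but scans the stripped text once with str.find instead of
--     splitting into lines: the first "\n## " occurrence marks the first non-initial
--     "## " section."""
--     t = (solution_doc or "").strip()
--     if not t:
--         return ""
--     idx = t.find("\n## ")
--     chunk = t if idx == -1 else t[idx + 1:].strip()
--     chunk = chunk[:max_len].rstrip()
--     return chunk or t[:max_len]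
-- ===== Notes on version B (the rewrite author's own statement) =====
-- stated objective: idiomatic
-- what changed: B drops the split-into-lines list, the enumerate loop and the join: it finds the first non-initial '## ' section by a single str.find of the marker '\n## ' on the stripped text and slices the tail directly.
import Mathlib
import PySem

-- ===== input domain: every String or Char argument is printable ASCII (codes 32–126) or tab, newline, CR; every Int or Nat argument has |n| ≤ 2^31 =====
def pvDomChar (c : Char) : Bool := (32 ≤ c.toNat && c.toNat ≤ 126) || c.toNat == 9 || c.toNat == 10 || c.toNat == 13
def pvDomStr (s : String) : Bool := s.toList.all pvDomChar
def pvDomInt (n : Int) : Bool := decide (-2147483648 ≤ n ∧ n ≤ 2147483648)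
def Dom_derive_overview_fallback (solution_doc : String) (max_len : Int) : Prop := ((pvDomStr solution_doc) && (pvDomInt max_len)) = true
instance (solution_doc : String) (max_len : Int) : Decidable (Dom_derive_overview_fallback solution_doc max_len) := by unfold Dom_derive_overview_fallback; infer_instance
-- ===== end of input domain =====

-- B replaces A's split-into-lines + enumerate loop + join by a single find of "\n## " on the
-- stripped text; same return value (idiomatic, not claimed faster).

-- ===== PORT A =====
-- the 'for i, line in enumerate(lines): if line.startswith("## ") and i > 0: start_idx = i; break' loop
def pvLinesLoop (lines : List (List Char)) (i : Int) : Int :=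
  match lines with
  | [] => 0
  | l :: rest =>
      if PySem.Chars.startswith l ['#', '#', ' '] && decide (0 < i) then i
      else pvLinesLoop rest (i + 1)

def derive_overview_fallback (solution_doc : String) (max_len : Int) : String :=
  -- t = (solution_doc or "").strip()  ('or ""' is the identity on str up to strip)
  let t := PySem.Chars.strip solution_doc.toList
  if t = [] then ""
  else
    let lines := PySem.Chars.splitOn t ['\n']
    let start_idx := pvLinesLoop lines 0
    let chunk := if start_idx ≠ 0 then
        PySem.Chars.strip (PySem.Chars.join ['\n'] (PySem.List.slice lines (some start_idx) none))
      else t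
    let chunk2 := PySem.Chars.rstrip (PySem.Chars.slice chunk none (some max_len))
    if chunk2 = [] then String.ofList (PySem.Chars.slice t none (some max_len))
    else String.ofList chunk2

-- ===== PORT B =====
def derive_overview_fallback_alt (solution_doc : String) (max_len : Int) : String :=
  let t := PySem.Chars.strip solution_doc.toList
  if t = [] then ""
  else
    let idx := PySem.Chars.find t ['\n', '#', '#', ' ']
    let chunk := if idx = -1 then t
      else PySem.Chars.strip (PySem.Chars.slice t (some (idx + 1)) none)
    let chunk2 := PySem.Chars.rstrip (PySem.Chars.slice chunk none (some max_len))
    if chunk2 = [] then String.ofList (PySem.Chars.slice t none (some max_len))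
    else String.ofList chunk2

-- ===== PRECONDITION & SPEC =====
def Spec_derive_overview_fallback (solution_doc : String) (max_len : Int) (out : String) : Prop := out = derive_overview_fallback_alt solution_doc max_len
instance (solution_doc : String) (max_len : Int) (out : String) : Decidable (Spec_derive_overview_fallback solution_doc max_len out) := by unfold Spec_derive_overview_fallback; infer_instance

-- ===== CLAIM (what is proved, stated in full; the proofs are below) =====
def Claim_equal_derive_overview_fallback : Prop := ∀ (solution_doc : String) (max_len : Int), Dom_derive_overview_fallback solution_doc max_len → Spec_derive_overview_fallback solution_doc max_len (derive_overview_fallback solution_doc max_len)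

-- ===== LEMMAS AND PROOFS =====

-- reference line-splitter: what t.split("\n") computes, in directly-recursive form
def pvSplit : List Char → List (List Char)
  | [] => [[]]
  | c :: rest =>
      if c = '\n' then [] :: pvSplit rest
      else (c :: (pvSplit rest).headI) :: (pvSplit rest).tail

theorem pvSplit_ne_nil (cs : List Char) : pvSplit cs ≠ [] := by
  cases cs with
  | nil => simp [pvSplit]
  | cons c rest => by_cases h : c = '\n' <;> simp [pvSplit, h]

theorem splitOn_go_eq : ∀ (fuel : Nat) (l cur : List Char) (acc : List (List Char)),
    l.length < fuel →
    PySem.Chars.splitOn.go ['\n'] fuel l cur acc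
      = acc.reverse ++ ((cur.reverse ++ (pvSplit l).headI) :: (pvSplit l).tail) := by
  intro fuel
  induction fuel with
  | zero => intro l cur acc h; omega
  | succ fuel ih =>
    intro l cur acc h
    cases l with
    | nil =>
      rw [PySem.Chars.splitOn.go]
      · simp [pvSplit]
      · omega
    | cons c rest =>
      rw [PySem.Chars.splitOn.go]
      obtain ⟨h0, t0, hx⟩ := List.exists_cons_of_ne_nil (pvSplit_ne_nil rest)
      by_cases hc : c = '\n'
      · subst hc
        have hpre : ['\n'].isPrefixOf ('\n' :: rest) = true := by
          simp
        rw [if_pos hpre]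
        have := ih rest [] (cur.reverse :: acc) (by simpa using Nat.lt_of_succ_lt_succ h)
        simp only [List.length_cons, List.length_nil, List.drop_succ_cons, List.drop_zero]
          at this ⊢
        rw [this]
        simp [pvSplit, hx]
      · have hpre : ['\n'].isPrefixOf (c :: rest) = false := by
          rw [Bool.eq_false_iff]
          intro hp
          have := (List.cons_prefix_cons.1 (List.isPrefixOf_iff_prefix.1 hp)).1
          exact hc this.symm
        rw [if_neg (by simp [hpre])]
        have := ih rest (c :: cur) acc (by simpa using Nat.lt_of_succ_lt_succ h)
        rw [this]
        simp [pvSplit, hc, hx]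

theorem splitOn_eq (cs : List Char) : PySem.Chars.splitOn cs ['\n'] = pvSplit cs := by
  obtain ⟨h0, t0, hx⟩ := List.exists_cons_of_ne_nil (pvSplit_ne_nil cs)
  unfold PySem.Chars.splitOn
  rw [splitOn_go_eq (cs.length + 1) cs [] [] (by omega)]
  simp [hx]

theorem join_pvSplit (cs : List Char) : PySem.Chars.join ['\n'] (pvSplit cs) = cs := by
  induction cs with
  | nil => simp [pvSplit, PySem.Chars.join_singleton]
  | cons c rest ih =>
    obtain ⟨h0, t0, hx⟩ := List.exists_cons_of_ne_nil (pvSplit_ne_nil rest)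
    by_cases hc : c = '\n'
    · subst hc
      rw [show pvSplit ('\n' :: rest) = [] :: pvSplit rest by simp [pvSplit], hx,
        PySem.Chars.join_cons_cons, ← hx, ih]
      simp
    · rw [show pvSplit (c :: rest) = (c :: (pvSplit rest).headI) :: (pvSplit rest).tail by
        simp [pvSplit, hc], hx]
      cases t0 with
      | nil =>
        rw [hx] at ih
        simp only [List.headI, List.tail]
        rw [PySem.Chars.join_singleton] at ih ⊢
        simp [ih]
      | cons y t1 =>
        rw [hx] at ih
        simp only [List.headI, List.tail]
        rw [PySem.Chars.join_cons_cons] at ih ⊢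
        simp only [List.cons_append, List.append_assoc] at ih ⊢
        rw [ih]

theorem pvSplit_no_nl {cs : List Char} (h : '\n' ∉ cs) : pvSplit cs = [cs] := by
  induction cs with
  | nil => rfl
  | cons c rest ih =>
    have hc : ¬ c = '\n' := fun hc => h (by simp [hc])
    have hr : '\n' ∉ rest := fun hr => h (List.mem_cons_of_mem _ hr)
    simp [pvSplit, hc, ih hr]

theorem pvSplit_append {L0 cs' : List Char} (h : '\n' ∉ L0) :
    pvSplit (L0 ++ '\n' :: cs') = L0 :: pvSplit cs' := by
  induction L0 with
  | nil => simp [pvSplit]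
  | cons a l0 ih =>
    have ha : ¬ a = '\n' := fun hc => h (by simp [hc])
    have hr : '\n' ∉ l0 := fun hr => h (List.mem_cons_of_mem _ hr)
    simp [pvSplit, ha, ih hr]

theorem exists_decomp {cs : List Char} (h : '\n' ∈ cs) :
    ∃ L0 cs', '\n' ∉ L0 ∧ cs = L0 ++ '\n' :: cs' := by
  induction cs with
  | nil => cases h
  | cons c rest ih =>
    by_cases hc : c = '\n'
    · exact ⟨[], rest, by simp, by simp [hc]⟩
    · have hr : '\n' ∈ rest := by
        rcases List.mem_cons.1 h with h1 | h1
        · exact absurd h1.symm hc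
        · exact h1
      obtain ⟨L0, cs', h1, h2⟩ := ih hr
      exact ⟨c :: L0, cs', by
        intro hm
        rcases List.mem_cons.1 hm with hm | hm
        · exact hc hm.symm
        · exact h1 hm, by simp [h2]⟩

theorem prefix_append_nl : ∀ {sub L0 : List Char} (cs' : List Char), '\n' ∉ sub → '\n' ∉ L0 →
    (sub <+: (L0 ++ '\n' :: cs') ↔ sub <+: L0) := by
  intro sub
  induction sub with
  | nil => intro L0 cs' _ _; simp
  | cons s ss ih =>
    intro L0 cs' hs h0
    have hsn : s ≠ '\n' := fun h => hs (by simp [h])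
    have hss : '\n' ∉ ss := fun h => hs (List.mem_cons_of_mem _ h)
    cases L0 with
    | nil => simp [List.cons_prefix_cons, hsn]
    | cons a l0 =>
      have hl0 : '\n' ∉ l0 := fun h => h0 (List.mem_cons_of_mem _ h)
      simp only [List.cons_append, List.cons_prefix_cons]
      rw [ih cs' hss hl0]

theorem find_eq_of {s sub : List Char} {k : Nat} (h1 : sub <+: s.drop k)
    (h2 : ∀ i, i < k → ¬ sub <+: s.drop i) : PySem.Chars.find s sub = (k : Int) := by
  have hinf : sub <:+: s := h1.isInfix.trans (List.drop_suffix k s).isInfix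
  have hn : 0 ≤ PySem.Chars.find s sub := (PySem.Chars.find_nonneg_iff s sub).2 hinf
  obtain ⟨hp, hmin⟩ := PySem.Chars.find_spec hn
  have hk : (PySem.Chars.find s sub).toNat = k := by
    rcases lt_trichotomy (PySem.Chars.find s sub).toNat k with h | h | h
    · exact absurd hp (h2 _ h)
    · exact h
    · exact absurd h1 (hmin _ h)
  omega

theorem drop_decomp (L0 cs' : List Char) (j : Nat) :
    (L0 ++ '\n' :: cs').drop (L0.length + 1 + j) = cs'.drop j := by
  rw [List.drop_append, List.drop_eq_nil_of_le (by omega)]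
  have h2 : L0.length + 1 + j - L0.length = j + 1 := by omega
  rw [h2]
  simp [List.drop_succ_cons]

theorem drop_decomp0 (L0 cs' : List Char) :
    (L0 ++ '\n' :: cs').drop L0.length = '\n' :: cs' := by
  rw [List.drop_append, List.drop_eq_nil_of_le (by omega)]
  simp

theorem not_prefix_of_lt {L0 cs' : List Char} (h0 : '\n' ∉ L0) {i : Nat} (hi : i < L0.length) :
    ¬ ['\n', '#', '#', ' '] <+: (L0 ++ '\n' :: cs').drop i := by
  intro hpre
  rw [List.drop_append_of_le_length (le_of_lt hi), List.drop_eq_getElem_cons hi,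
    List.cons_append] at hpre
  have := (List.cons_prefix_cons.1 hpre).1
  exact h0 (this ▸ List.getElem_mem hi)

theorem find_no_nl {cs : List Char} (h : '\n' ∉ cs) :
    PySem.Chars.find cs ['\n', '#', '#', ' '] = -1 := by
  rw [PySem.Chars.find_eq_neg_one_iff]
  intro hinf
  exact h (hinf.sublist.subset (by simp))

theorem find_decomp {L0 cs' : List Char} (h0 : '\n' ∉ L0) :
    PySem.Chars.find (L0 ++ '\n' :: cs') ['\n', '#', '#', ' ']
      = if ['#', '#', ' '] <+: cs' then (L0.length : Int)
        else if PySem.Chars.find cs' ['\n', '#', '#', ' '] = -1 then -1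
        else (L0.length : Int) + 1 + PySem.Chars.find cs' ['\n', '#', '#', ' '] := by
  by_cases hq : ['#', '#', ' '] <+: cs'
  · rw [if_pos hq]
    have h1 : ['\n', '#', '#', ' '] <+: (L0 ++ '\n' :: cs').drop L0.length := by
      rw [drop_decomp0]
      exact List.cons_prefix_cons.2 ⟨rfl, hq⟩
    have h2 : ∀ i, i < L0.length → ¬ ['\n', '#', '#', ' '] <+: (L0 ++ '\n' :: cs').drop i :=
      fun i hi => not_prefix_of_lt h0 hi
    exact find_eq_of h1 h2
  · rw [if_neg hq]
    by_cases hf : PySem.Chars.find cs' ['\n', '#', '#', ' '] = -1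
    · rw [if_pos hf]
      rw [PySem.Chars.find_eq_neg_one_iff] at hf ⊢
      intro hinf
      obtain ⟨j, hj⟩ := (PySem.Chars.exists_prefix_drop_iff_isIn _ _).2
        ((PySem.Chars.isIn_iff_infix _ _).2 hinf)
      rcases lt_trichotomy j L0.length with h | h | h
      · exact not_prefix_of_lt h0 h hj
      · subst h
        rw [drop_decomp0] at hj
        exact hq (List.cons_prefix_cons.1 hj).2
      · obtain ⟨j', rfl⟩ : ∃ j', j = L0.length + 1 + j' := ⟨j - L0.length - 1, by omega⟩
        rw [drop_decomp] at hj
        exact hf (hj.isInfix.trans (List.drop_suffix j' cs').isInfix)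
    · rw [if_neg hf]
      have hj0 : 0 ≤ PySem.Chars.find cs' ['\n', '#', '#', ' '] := by
        have := PySem.Chars.neg_one_le_find cs' ['\n', '#', '#', ' ']
        omega
      obtain ⟨hp, hmin⟩ := PySem.Chars.find_spec hj0
      have h1 : ['\n', '#', '#', ' '] <+: (L0 ++ '\n' :: cs').drop
          (L0.length + 1 + (PySem.Chars.find cs' ['\n', '#', '#', ' ']).toNat) := by
        rw [drop_decomp]
        exact hp
      have h2 : ∀ i, i < L0.length + 1 + (PySem.Chars.find cs' ['\n', '#', '#', ' ']).toNat →
          ¬ ['\n', '#', '#', ' '] <+: (L0 ++ '\n' :: cs').drop i := by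
        intro i hi
        rcases lt_trichotomy i L0.length with h | h | h
        · exact not_prefix_of_lt h0 h
        · subst h
          rw [drop_decomp0]
          intro hpre
          exact hq (List.cons_prefix_cons.1 hpre).2
        · obtain ⟨i', rfl⟩ : ∃ i', i = L0.length + 1 + i' := ⟨i - L0.length - 1, by omega⟩
          rw [drop_decomp]
          exact hmin i' (by omega)
      rw [find_eq_of h1 h2]
      omega

-- the loop ↔ find correspondence, stated for a running index i ≥ 1
def pvP (cs : List Char) (i : Int) : Prop :=
  if ['#', '#', ' '] <+: cs then pvLinesLoop (pvSplit cs) i = i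
  else if PySem.Chars.find cs ['\n', '#', '#', ' '] = -1 then pvLinesLoop (pvSplit cs) i = 0
  else ∃ d : Nat, pvLinesLoop (pvSplit cs) i = i + 1 + (d : Int) ∧
    PySem.Chars.join ['\n'] ((pvSplit cs).drop (1 + d))
      = cs.drop ((PySem.Chars.find cs ['\n', '#', '#', ' ']).toNat + 1)

theorem pvP_base {cs : List Char} (hnl : '\n' ∉ cs) {i : Int} (hi : 1 ≤ i) : pvP cs i := by
  unfold pvP
  rw [pvSplit_no_nl hnl]
  by_cases hp : ['#', '#', ' '] <+: cs
  · rw [if_pos hp]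
    have hb : PySem.Chars.startswith cs ['#', '#', ' '] = true :=
      (PySem.Chars.startswith_iff _ _).2 hp
    simp [pvLinesLoop, hb, show (0 : Int) < i by omega]
  · rw [if_neg hp, if_pos (find_no_nl hnl)]
    have hb : PySem.Chars.startswith cs ['#', '#', ' '] = false := by
      rw [Bool.eq_false_iff]
      intro h
      exact hp ((PySem.Chars.startswith_iff _ _).1 h)
    simp [pvLinesLoop, hb]

theorem loop_find : ∀ (n : Nat) (cs : List Char), cs.length ≤ n → ∀ i : Int, 1 ≤ i →
    pvP cs i := by
  intro n
  induction n with
  | zero =>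
    intro cs hcs i hi
    have : cs = [] := List.eq_nil_of_length_eq_zero (by omega)
    subst this
    exact pvP_base (by simp) hi
  | succ n ih =>
    intro cs hcs i hi
    by_cases hnl : '\n' ∈ cs
    · obtain ⟨L0, cs', h0, rfl⟩ := exists_decomp hnl
      have hlen : cs'.length ≤ n := by
        simp only [List.length_append, List.length_cons] at hcs
        omega
      unfold pvP
      rw [pvSplit_append h0]
      by_cases hp : ['#', '#', ' '] <+: L0
      · rw [if_pos ((prefix_append_nl cs' (by decide) h0).2 hp)]
        have hb : PySem.Chars.startswith L0 ['#', '#', ' '] = true :=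
          (PySem.Chars.startswith_iff _ _).2 hp
        simp [pvLinesLoop, hb, show (0 : Int) < i by omega]
      · have hcond : ¬ ['#', '#', ' '] <+: (L0 ++ '\n' :: cs') := fun h =>
          hp ((prefix_append_nl cs' (by decide) h0).1 h)
        rw [if_neg hcond]
        have hb : PySem.Chars.startswith L0 ['#', '#', ' '] = false := by
          rw [Bool.eq_false_iff]
          intro h
          exact hp ((PySem.Chars.startswith_iff _ _).1 h)
        have hstep : pvLinesLoop (L0 :: pvSplit cs') i = pvLinesLoop (pvSplit cs') (i + 1) := by
          simp [pvLinesLoop, hb]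
        have H := ih cs' hlen (i + 1) (by omega)
        unfold pvP at H
        by_cases hq : ['#', '#', ' '] <+: cs'
        · have hfind : PySem.Chars.find (L0 ++ '\n' :: cs') ['\n', '#', '#', ' ']
              = (L0.length : Int) := by rw [find_decomp h0, if_pos hq]
          rw [hfind, if_neg (by omega : ¬ (L0.length : Int) = -1)]
          rw [if_pos hq] at H
          refine ⟨0, by rw [hstep, H]; push_cast; ring, ?_⟩
          have hd : (L0 :: pvSplit cs').drop (1 + 0) = pvSplit cs' := by simp
          rw [hd, join_pvSplit]
          have : ((L0.length : Int)).toNat + 1 = L0.length + 1 + 0 := by omega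
          rw [this, drop_decomp]
          simp
        · by_cases hf : PySem.Chars.find cs' ['\n', '#', '#', ' '] = -1
          · have hfind : PySem.Chars.find (L0 ++ '\n' :: cs') ['\n', '#', '#', ' '] = -1 := by
              rw [find_decomp h0, if_neg hq, if_pos hf]
            rw [hfind, if_pos rfl, hstep]
            rw [if_neg hq, if_pos hf] at H
            exact H
          · have hj0 : 0 ≤ PySem.Chars.find cs' ['\n', '#', '#', ' '] := by
              have := PySem.Chars.neg_one_le_find cs' ['\n', '#', '#', ' ']
              omega
            have hfind : PySem.Chars.find (L0 ++ '\n' :: cs') ['\n', '#', '#', ' ']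
                = (L0.length : Int) + 1 + PySem.Chars.find cs' ['\n', '#', '#', ' '] := by
              rw [find_decomp h0, if_neg hq, if_neg hf]
            rw [hfind, if_neg (by omega)]
            rw [if_neg hq, if_neg hf] at H
            obtain ⟨d, hr, hjoin⟩ := H
            refine ⟨d + 1, by rw [hstep, hr]; push_cast; ring, ?_⟩
            have hd : (L0 :: pvSplit cs').drop (1 + (d + 1)) = (pvSplit cs').drop (1 + d) := by
              have : 1 + (d + 1) = (1 + d) + 1 := by omega
              rw [this, List.drop_succ_cons]
            rw [hd, hjoin]
            have : ((L0.length : Int) + 1 + PySem.Chars.find cs' ['\n', '#', '#', ' ']).toNat + 1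
                = L0.length + 1 + ((PySem.Chars.find cs' ['\n', '#', '#', ' ']).toNat + 1) := by
              omega
            rw [this, drop_decomp]
    · exact pvP_base hnl hi

-- the two "chunk" computations agree
theorem chunk_eq (t : List Char) :
    (if pvLinesLoop (PySem.Chars.splitOn t ['\n']) 0 ≠ 0 then
       PySem.Chars.strip (PySem.Chars.join ['\n']
         (PySem.List.slice (PySem.Chars.splitOn t ['\n'])
           (some (pvLinesLoop (PySem.Chars.splitOn t ['\n']) 0)) none))
     else t)
    = (if PySem.Chars.find t ['\n', '#', '#', ' '] = -1 then t
       else PySem.Chars.strip (PySem.Chars.slice t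
         (some (PySem.Chars.find t ['\n', '#', '#', ' '] + 1)) none)) := by
  rw [splitOn_eq]
  by_cases hnl : '\n' ∈ t
  · obtain ⟨L0, cs', h0, rfl⟩ := exists_decomp hnl
    rw [pvSplit_append h0]
    have hstep : pvLinesLoop (L0 :: pvSplit cs') 0 = pvLinesLoop (pvSplit cs') 1 := by
      simp [pvLinesLoop]
    rw [hstep]
    have H := loop_find cs'.length cs' le_rfl 1 le_rfl
    unfold pvP at H
    by_cases hq : ['#', '#', ' '] <+: cs'
    · rw [if_pos hq] at H
      rw [H]
      have hfind : PySem.Chars.find (L0 ++ '\n' :: cs') ['\n', '#', '#', ' ']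
          = (L0.length : Int) := by rw [find_decomp h0, if_pos hq]
      rw [hfind, if_pos (by norm_num), if_neg (by omega : ¬ (L0.length : Int) = -1)]
      rw [PySem.List.slice_from _ (by norm_num : (0 : Int) ≤ 1),
        PySem.Chars.slice_eq_listSlice, PySem.List.slice_from _ (by omega)]
      have h1 : ((1 : Int)).toNat = 1 := rfl
      have h2 : ((L0.length : Int) + 1).toNat = L0.length + 1 + 0 := by omega
      rw [h1, h2, drop_decomp]
      simp [join_pvSplit]
    · rw [if_neg hq] at H
      by_cases hf : PySem.Chars.find cs' ['\n', '#', '#', ' '] = -1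
      · rw [if_pos hf] at H
        have hfind : PySem.Chars.find (L0 ++ '\n' :: cs') ['\n', '#', '#', ' '] = -1 := by
          rw [find_decomp h0, if_neg hq, if_pos hf]
        rw [H, hfind]
        simp
      · rw [if_neg hf] at H
        obtain ⟨d, hr, hjoin⟩ := H
        have hj0 : 0 ≤ PySem.Chars.find cs' ['\n', '#', '#', ' '] := by
          have := PySem.Chars.neg_one_le_find cs' ['\n', '#', '#', ' ']
          omega
        have hfind : PySem.Chars.find (L0 ++ '\n' :: cs') ['\n', '#', '#', ' ']
            = (L0.length : Int) + 1 + PySem.Chars.find cs' ['\n', '#', '#', ' '] := by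
          rw [find_decomp h0, if_neg hq, if_neg hf]
        rw [hr, hfind, if_pos (by omega : (1 : Int) + 1 + (d : Int) ≠ 0), if_neg (by omega)]
        rw [PySem.List.slice_from _ (by omega : (0 : Int) ≤ 1 + 1 + (d : Int)),
          PySem.Chars.slice_eq_listSlice, PySem.List.slice_from _ (by omega)]
        have h1 : ((1 : Int) + 1 + (d : Int)).toNat = (1 + d) + 1 := by omega
        have h2 : ((L0.length : Int) + 1 + PySem.Chars.find cs' ['\n', '#', '#', ' '] + 1).toNat
            = L0.length + 1 + ((PySem.Chars.find cs' ['\n', '#', '#', ' ']).toNat + 1) := by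
          omega
        rw [h1, h2, List.drop_succ_cons, hjoin, drop_decomp]
  · rw [pvSplit_no_nl hnl, find_no_nl hnl]
    simp [pvLinesLoop]

-- ===== VERDICT (by name: the statement is the Claim_ definition above) =====
theorem derive_overview_fallback_spec : Claim_equal_derive_overview_fallback := by
  intro solution_doc max_len _
  unfold Spec_derive_overview_fallback
  simp only [derive_overview_fallback, derive_overview_fallback_alt]
  rw [chunk_eq]
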